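-- pv_equiv track=rewrite | github.com/kaneis1/CaSiNo_negotiation-agent | structured_cot/scripts/baseline_weakness_scan.py | pareto_max_self_given_floor
-- ===== SOURCE A (Python) =====
-- from itertools import product
-- from typing import Dict, Iterable, List, Mapping, Optional, Tuple
--
-- ITEMS = ("Food", "Water", "Firewood")
--
-- def u(counts: Mapping[str, int], pts: Mapping[str, int]) -> int:
--     return sum(int(counts.get(i, 0)) * int(pts.get(i, 0)) for i in ITEMS)
--
-- def all_splits() -> List[Dict[str, Dict[str, int]]]:
--     out = []
--     for f, w, fw in product(range(4), repeat=3):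
--         out.append({
--             "self": {"Food": f, "Water": w, "Firewood": fw},
--             "opp":  {"Food": 3 - f, "Water": 3 - w, "Firewood": 3 - fw},
--         })
--     return out
--
-- def pareto_max_self_given_floor(pts_self: Mapping[str, int],
--                                 pts_opp:  Mapping[str, int],
--                                 opp_floor: int = 15) -> int:
--     best = 0
--     for split in all_splits():
--         s = u(split["self"], pts_self)
--         o = u(split["opp"],  pts_opp)
--         if o >= opp_floor and s > best:
--             best = s
--     return best
-- ===== SOURCE B (Python) =====
-- ITEMS = ("Food", "Water", "Firewood")
--
-- def pareto_max_self_given_floor(pts_self, pts_opp, opp_floor=15):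
--     # DP over items: dict mapping each achievable opponent total to the best self total,
--     # merging states with equal opponent total as we go.
--     best_by_opp = {0: 0}
--     for item in ITEMS:
--         gs = int(pts_self.get(item, 0))
--         go = int(pts_opp.get(item, 0))
--         nxt = {}
--         for o, s in best_by_opp.items():
--             for k in range(4):
--                 no = o + (3 - k) * go
--                 ns = s + k * gs
--                 if nxt.get(no, ns - 1) < ns:
--                     nxt[no] = ns
--         best_by_opp = nxt
--     best = 0
--     for o, s in best_by_opp.items():
--         if o >= opp_floor and s > best:
--             best = s
--     return best
-- ===== Notes on version B (the rewrite author's own statement) =====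
-- stated objective: alternative
-- what changed: Replaces the flat 64-way enumeration of split dictionaries with a state-merging DP over the three items: a dict maps each achievable opponent total to the best self total (states with equal opponent totals are collapsed at every step), then one clamped max over the qualifying keys.
import Mathlib
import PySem

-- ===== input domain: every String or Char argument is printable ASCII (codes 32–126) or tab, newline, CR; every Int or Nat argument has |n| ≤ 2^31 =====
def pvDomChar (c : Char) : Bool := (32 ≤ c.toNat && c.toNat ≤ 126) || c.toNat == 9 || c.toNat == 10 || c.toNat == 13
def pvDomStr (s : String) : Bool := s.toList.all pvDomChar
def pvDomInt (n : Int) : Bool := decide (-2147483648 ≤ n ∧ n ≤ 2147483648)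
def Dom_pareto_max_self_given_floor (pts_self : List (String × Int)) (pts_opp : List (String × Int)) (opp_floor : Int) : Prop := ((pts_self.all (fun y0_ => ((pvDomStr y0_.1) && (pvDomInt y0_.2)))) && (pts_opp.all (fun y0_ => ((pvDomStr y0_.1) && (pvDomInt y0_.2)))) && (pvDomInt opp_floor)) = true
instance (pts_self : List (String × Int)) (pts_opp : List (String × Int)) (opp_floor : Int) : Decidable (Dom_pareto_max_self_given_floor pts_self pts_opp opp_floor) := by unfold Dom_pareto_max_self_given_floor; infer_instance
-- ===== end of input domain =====

-- B replaces A's flat enumeration of 64 split dictionaries with a state-merging DP: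
-- a dict from achievable opponent total to best self total, folded item by item
-- (objective: alternative algorithm, same asymptotic cost).


-- ===== PORT A =====
def pvITEMS : List String := ["Food", "Water", "Firewood"]

-- u(counts, pts): sum over ITEMS of counts.get(i,0) * pts.get(i,0)  (int() is identity on int)
def pvU (counts : PySem.Dict String Int) (pts : PySem.Dict String Int) : Int :=
  pvITEMS.foldl (fun acc i => acc + counts.getD i 0 * pts.getD i 0) 0

-- all_splits(): one dict {"self": …, "opp": …} per (f, w, fw) in product(range(4), repeat=3)
def pvAllSplits : List (PySem.Dict String (PySem.Dict String Int)) :=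
  (PySem.List.pyRange 0 4 1).flatMap (fun f =>
    (PySem.List.pyRange 0 4 1).flatMap (fun w =>
      (PySem.List.pyRange 0 4 1).map (fun fw =>
        PySem.Dict.mk [("self", PySem.Dict.mk [("Food", f), ("Water", w), ("Firewood", fw)]),
                       ("opp",  PySem.Dict.mk [("Food", 3 - f), ("Water", 3 - w), ("Firewood", 3 - fw)])])))

def pareto_max_self_given_floor (pts_self : List (String × Int)) (pts_opp : List (String × Int)) (opp_floor : Int) : Int :=
  pvAllSplits.foldl (fun best split =>
    -- split["self"] / split["opp"]: both keys are always present in the constructed dicts,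
    -- so the .getD default is unreachable
    let s := pvU ((split.get? "self").getD PySem.Dict.empty) (PySem.Dict.mk pts_self)
    let o := pvU ((split.get? "opp").getD PySem.Dict.empty) (PySem.Dict.mk pts_opp)
    if opp_floor ≤ o ∧ best < s then s else best) 0

-- ===== PORT B =====
-- nxt.get(no, ns - 1) < ns  ⟹  nxt[no] = ns
def pvUpd (nxt : PySem.Dict Int Int) (no ns : Int) : PySem.Dict Int Int :=
  if nxt.getD no (ns - 1) < ns then nxt.insert no ns else nxt

def pareto_max_self_given_floor_alt (pts_self : List (String × Int)) (pts_opp : List (String × Int)) (opp_floor : Int) : Int :=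
  let final := pvITEMS.foldl (fun d item =>
    let gs := (PySem.Dict.mk pts_self).getD item 0
    let go := (PySem.Dict.mk pts_opp).getD item 0
    d.items.foldl (fun nxt os =>
      (PySem.List.pyRange 0 4 1).foldl (fun nxt k =>
        pvUpd nxt (os.1 + (3 - k) * go) (os.2 + k * gs)) nxt) PySem.Dict.empty)
    (PySem.Dict.mk [((0 : Int), (0 : Int))])
  final.items.foldl (fun best os => if opp_floor ≤ os.1 ∧ best < os.2 then os.2 else best) 0

-- ===== PRECONDITION & SPEC =====
def Spec_pareto_max_self_given_floor (pts_self : List (String × Int)) (pts_opp : List (String × Int)) (opp_floor : Int) (out : Int) : Prop := out = pareto_max_self_given_floor_alt pts_self pts_opp opp_floor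
instance (pts_self : List (String × Int)) (pts_opp : List (String × Int)) (opp_floor : Int) (out : Int) : Decidable (Spec_pareto_max_self_given_floor pts_self pts_opp opp_floor out) := by unfold Spec_pareto_max_self_given_floor; infer_instance

-- ===== CLAIM =====
def Claim_equal_pareto_max_self_given_floor : Prop := ∀ (pts_self : List (String × Int)) (pts_opp : List (String × Int)) (opp_floor : Int), Dom_pareto_max_self_given_floor pts_self pts_opp opp_floor → Spec_pareto_max_self_given_floor pts_self pts_opp opp_floor (pareto_max_self_given_floor pts_self pts_opp opp_floor)

-- ===== LEMMAS AND PROOFS =====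

-- A's loop step on an already-computed (self, opp) pair
def pvStep (fl : Int) (b : Int) (so : Int × Int) : Int :=
  if fl ≤ so.2 ∧ b < so.1 then so.1 else b

-- the list of (s, o) pairs A's loop visits, built item by item (the L-side of the simulation)
def pvLStep (gs go : Int) (ts : List (Int × Int)) : List (Int × Int) :=
  ts.flatMap (fun so => (PySem.List.pyRange 0 4 1).map
    (fun k => (so.1 + k * gs, so.2 + (3 - k) * go)))

-- one DP step of B (the D-side of the simulation)
def pvDStep (gs go : Int) (d : PySem.Dict Int Int) : PySem.Dict Int Int :=
  d.items.foldl (fun nxt os =>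
    (PySem.List.pyRange 0 4 1).foldl (fun nxt k =>
      pvUpd nxt (os.1 + (3 - k) * go) (os.2 + k * gs)) nxt) PySem.Dict.empty

-- the simulation relation: dict entries are achievable pairs, and every pair is dominated
def pvRel (L : List (Int × Int)) (D : PySem.Dict Int Int) : Prop :=
  (∀ p ∈ D.items, (p.2, p.1) ∈ L) ∧ (∀ q ∈ L, ∃ v, D.get? q.2 = some v ∧ q.1 ≤ v)

-- fold of pvUpd over a candidate list
def pvF (d : PySem.Dict Int Int) (cs : List (Int × Int)) : PySem.Dict Int Int :=
  cs.foldl (fun d c => pvUpd d c.1 c.2) d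

theorem pvUpd_sound (d : PySem.Dict Int Int) (no ns : Int) (p : Int × Int)
    (h : p ∈ (pvUpd d no ns).items) : p ∈ d.items ∨ p = (no, ns) := by
  unfold pvUpd at h
  split at h
  · rcases (PySem.Dict.mem_items_insert _ _ _ _).1 h with h1 | h2
    · right; exact h1
    · left; exact h2.1
  · left; exact h

theorem pvUpd_mono (d : PySem.Dict Int Int) (no ns o : Int) (v : Int)
    (h : d.get? o = some v) : ∃ v', (pvUpd d no ns).get? o = some v' ∧ v ≤ v' := by
  unfold pvUpd
  split
  · rename_i hlt
    rw [PySem.Dict.get?_insert]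
    by_cases ho : o = no
    · subst ho
      refine ⟨ns, by simp, ?_⟩
      rw [PySem.Dict.getD_eq_get?_getD, h] at hlt
      simpa using le_of_lt hlt
    · exact ⟨v, by simp [ho, h], le_refl v⟩
  · exact ⟨v, h, le_refl v⟩

theorem pvUpd_hit (d : PySem.Dict Int Int) (no ns : Int) :
    ∃ v', (pvUpd d no ns).get? no = some v' ∧ ns ≤ v' := by
  unfold pvUpd
  split
  · exact ⟨ns, PySem.Dict.get?_insert_self d no ns, le_refl ns⟩
  · rename_i hge
    rw [not_lt, PySem.Dict.getD_eq_get?_getD] at hge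
    cases hv : d.get? no with
    | none => rw [hv] at hge; simp at hge
    | some v => rw [hv] at hge; exact ⟨v, rfl, by simpa using hge⟩

theorem pvF_sound (cs : List (Int × Int)) : ∀ (d : PySem.Dict Int Int) (p : Int × Int),
    p ∈ (pvF d cs).items → p ∈ d.items ∨ p ∈ cs := by
  induction cs with
  | nil => intro d p h; exact Or.inl h
  | cons c t ih =>
    intro d p h
    rcases ih (pvUpd d c.1 c.2) p h with h1 | h2
    · rcases pvUpd_sound d c.1 c.2 p h1 with h3 | h4
      · exact Or.inl h3
      · exact Or.inr (by simp [h4])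
    · exact Or.inr (List.mem_cons_of_mem c h2)

theorem pvF_mono (cs : List (Int × Int)) : ∀ (d : PySem.Dict Int Int) (o v : Int),
    d.get? o = some v → ∃ v', (pvF d cs).get? o = some v' ∧ v ≤ v' := by
  induction cs with
  | nil => intro d o v h; exact ⟨v, h, le_refl v⟩
  | cons c t ih =>
    intro d o v h
    obtain ⟨w, hw, hvw⟩ := pvUpd_mono d c.1 c.2 o v h
    obtain ⟨v', hv', hwv'⟩ := ih (pvUpd d c.1 c.2) o w hw
    exact ⟨v', hv', le_trans hvw hwv'⟩

theorem pvF_hit (cs : List (Int × Int)) : ∀ (d : PySem.Dict Int Int) (c : Int × Int),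
    c ∈ cs → ∃ v', (pvF d cs).get? c.1 = some v' ∧ c.2 ≤ v' := by
  induction cs with
  | nil => intro d c h; exact absurd h (List.not_mem_nil)
  | cons c0 t ih =>
    intro d c h
    rcases List.mem_cons.1 h with h1 | h2
    · subst h1
      obtain ⟨w, hw, hcw⟩ := pvUpd_hit d c.1 c.2
      obtain ⟨v', hv', hwv'⟩ := pvF_mono t (pvUpd d c.1 c.2) c.1 w hw
      exact ⟨v', hv', le_trans hcw hwv'⟩
    · exact ih (pvUpd d c0.1 c0.2) c h2

-- the double loop of pvDStep is pvF over the flattened candidate list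
theorem pvDStep_eq_pvF (gs go : Int) (es : List (Int × Int)) : ∀ (d : PySem.Dict Int Int),
    es.foldl (fun nxt os =>
      (PySem.List.pyRange 0 4 1).foldl (fun nxt k =>
        pvUpd nxt (os.1 + (3 - k) * go) (os.2 + k * gs)) nxt) d
    = pvF d (es.flatMap (fun os => (PySem.List.pyRange 0 4 1).map
        (fun k => (os.1 + (3 - k) * go, os.2 + k * gs)))) := by
  induction es with
  | nil => intro d; rfl
  | cons os t ih =>
    intro d
    rw [List.foldl_cons, List.flatMap_cons]
    unfold pvF
    rw [List.foldl_append, List.foldl_map]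
    exact ih _

theorem pvRel_step (gs go : Int) (L : List (Int × Int)) (D : PySem.Dict Int Int)
    (h : pvRel L D) : pvRel (pvLStep gs go L) (pvDStep gs go D) := by
  obtain ⟨h1, h2⟩ := h
  rw [pvRel]
  rw [pvDStep, pvDStep_eq_pvF]
  constructor
  · intro p hp
    rcases pvF_sound _ _ _ hp with h0 | hc
    · simp [PySem.Dict.empty] at h0
    · rw [List.mem_flatMap] at hc
      obtain ⟨os, hos, hc2⟩ := hc
      rw [List.mem_map] at hc2
      obtain ⟨k, hk, hpk⟩ := hc2
      have hmem := h1 os hos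
      rw [pvLStep, List.mem_flatMap]
      exact ⟨(os.2, os.1), hmem, List.mem_map.2 ⟨k, hk, by rw [← hpk]⟩⟩
  · intro q hq
    rw [pvLStep, List.mem_flatMap] at hq
    obtain ⟨so, hso, hq2⟩ := hq
    rw [List.mem_map] at hq2
    obtain ⟨k, hk, hqk⟩ := hq2
    obtain ⟨v, hv, hsv⟩ := h2 so hso
    have hmem : (so.2, v) ∈ D.items := PySem.Dict.mem_items_of_get?_eq_some _ hv
    have hcand : (so.2 + (3 - k) * go, v + k * gs) ∈
        D.items.flatMap (fun os => (PySem.List.pyRange 0 4 1).map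
          (fun k => (os.1 + (3 - k) * go, os.2 + k * gs))) := by
      rw [List.mem_flatMap]
      exact ⟨(so.2, v), hmem, List.mem_map.2 ⟨k, hk, rfl⟩⟩
    obtain ⟨v', hv', hvv'⟩ := pvF_hit _ PySem.Dict.empty _ hcand
    refine ⟨v', by rw [← hqk]; exact hv', ?_⟩
    have : q.1 = so.1 + k * gs := by rw [← hqk]
    rw [this]
    have : so.1 + k * gs ≤ v + k * gs := by
      have := hsv; omega
    exact le_trans this hvv'

-- foldl pvStep characterisation
theorem pvStep_le (fl : Int) (l : List (Int × Int)) : ∀ b, b ≤ l.foldl (pvStep fl) b := by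
  induction l with
  | nil => intro b; exact le_refl b
  | cons x t ih =>
    intro b
    refine le_trans ?_ (ih (pvStep fl b x))
    unfold pvStep; split <;> omega

theorem pvStep_ge_mem (fl : Int) (l : List (Int × Int)) : ∀ b (q : Int × Int), q ∈ l →
    fl ≤ q.2 → q.1 ≤ l.foldl (pvStep fl) b := by
  induction l with
  | nil => intro b q h; exact absurd h (List.not_mem_nil)
  | cons x t ih =>
    intro b q h hfl
    rcases List.mem_cons.1 h with h1 | h2
    · subst h1
      refine le_trans ?_ (pvStep_le fl t (pvStep fl b q))
      unfold pvStep; simp [hfl]; omega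
    · exact ih (pvStep fl b x) q h2 hfl

theorem pvStep_cases (fl : Int) (l : List (Int × Int)) : ∀ b,
    l.foldl (pvStep fl) b = b ∨ ∃ q ∈ l, fl ≤ q.2 ∧ l.foldl (pvStep fl) b = q.1 := by
  induction l with
  | nil => intro b; exact Or.inl rfl
  | cons x t ih =>
    intro b
    rcases ih (pvStep fl b x) with h1 | h2
    · rw [List.foldl_cons]
      by_cases hc : fl ≤ x.2 ∧ b < x.1
      · right
        exact ⟨x, List.mem_cons_self, hc.1, by rw [h1]; unfold pvStep; simp [hc]⟩
      · left
        rw [h1]; unfold pvStep; simp only [if_neg hc]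
    · right
      obtain ⟨q, hq, hfl, heq⟩ := h2
      exact ⟨q, List.mem_cons_of_mem x hq, hfl, by rw [List.foldl_cons]; exact heq⟩

-- the two clamped maxima agree under the simulation relation
theorem pvRel_final (fl : Int) (L : List (Int × Int)) (D : PySem.Dict Int Int)
    (h : pvRel L D) :
    L.foldl (pvStep fl) 0 = (D.items.map Prod.swap).foldl (pvStep fl) 0 := by
  obtain ⟨h1, h2⟩ := h
  apply le_antisymm
  · rcases pvStep_cases fl L 0 with hc | ⟨q, hq, hfl, heq⟩
    · rw [hc]; exact pvStep_le fl _ 0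
    · rw [heq]
      obtain ⟨v, hv, hqv⟩ := h2 q hq
      have hmem : (q.2, v) ∈ D.items := PySem.Dict.mem_items_of_get?_eq_some _ hv
      have : (v, q.2) ∈ D.items.map Prod.swap := List.mem_map.2 ⟨(q.2, v), hmem, rfl⟩
      exact le_trans hqv (pvStep_ge_mem fl _ 0 (v, q.2) this hfl)
  · rcases pvStep_cases fl (D.items.map Prod.swap) 0 with hc | ⟨q, hq, hfl, heq⟩
    · rw [hc]; exact pvStep_le fl _ 0
    · rw [heq]
      rw [List.mem_map] at hq
      obtain ⟨p, hp, hpq⟩ := hq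
      have hmem := h1 p hp
      subst hpq
      exact pvStep_ge_mem fl L 0 p.swap hmem hfl

-- the simulation holds after folding any item list from the initial state
theorem pvRel_fold (f g : String → Int) (its : List String) :
    ∀ (L : List (Int × Int)) (D : PySem.Dict Int Int), pvRel L D →
    pvRel (its.foldl (fun ts item => pvLStep (f item) (g item) ts) L)
          (its.foldl (fun d item => pvDStep (f item) (g item) d) D) := by
  induction its with
  | nil => intro L D h; exact h
  | cons it t ih =>
    intro L D h
    exact ih _ _ (pvRel_step (f it) (g it) L D h)

theorem pvRel_init : pvRel [((0 : Int), (0 : Int))] (PySem.Dict.mk [((0 : Int), (0 : Int))]) := by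
  constructor
  · intro p hp
    simp at hp
    simp [hp]
  · intro q hq
    simp at hq
    exact ⟨0, by simp [hq, PySem.Dict.get?_mk_cons], by simp [hq]⟩

-- A's list of (u(self), u(opp)) over all_splits equals the item-by-item pair list
theorem pvPairs_eq (ps po : List (String × Int)) :
    pvAllSplits.map (fun split =>
      (pvU ((split.get? "self").getD PySem.Dict.empty) (PySem.Dict.mk ps),
       pvU ((split.get? "opp").getD PySem.Dict.empty) (PySem.Dict.mk po)))
    = pvITEMS.foldl (fun ts item =>
        pvLStep ((PySem.Dict.mk ps).getD item 0) ((PySem.Dict.mk po).getD item 0) ts)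
        [((0 : Int), (0 : Int))] := by
  simp only [pvAllSplits, pvITEMS, pvLStep, List.foldl_cons, List.foldl_nil,
    List.map_flatMap, List.map_map, List.flatMap_assoc, List.flatMap_map,
    List.flatMap_cons, List.flatMap_nil, List.append_nil]
  simp only [Function.comp_def]
  simp [pvU, pvITEMS, PySem.Dict.getD, PySem.Dict.get?, List.find?]

-- ===== VERDICT =====
theorem pareto_max_self_given_floor_spec : Claim_equal_pareto_max_self_given_floor := by
  intro ps po fl _
  unfold Spec_pareto_max_self_given_floor
  unfold pareto_max_self_given_floor pareto_max_self_given_floor_alt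
  have hA : pvAllSplits.foldl (fun best split =>
      let s := pvU ((split.get? "self").getD PySem.Dict.empty) (PySem.Dict.mk ps)
      let o := pvU ((split.get? "opp").getD PySem.Dict.empty) (PySem.Dict.mk po)
      if fl ≤ o ∧ best < s then s else best) 0
      = (pvAllSplits.map (fun split =>
          (pvU ((split.get? "self").getD PySem.Dict.empty) (PySem.Dict.mk ps),
           pvU ((split.get? "opp").getD PySem.Dict.empty) (PySem.Dict.mk po)))).foldl
          (pvStep fl) 0 := by
    rw [List.foldl_map]; rfl
  rw [hA, pvPairs_eq]
  have hrel := pvRel_fold (fun item => (PySem.Dict.mk ps).getD item 0)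
    (fun item => (PySem.Dict.mk po).getD item 0) pvITEMS _ _ pvRel_init
  rw [pvRel_final fl _ _ hrel]
  rw [List.foldl_map]
  rfl
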